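-- pv_equiv track=rewrite | github.com/foryourselfand/informatics_lab2_solver | helper.py | get_with_spaces
-- ===== SOURCE A (Python) =====
-- def get_with_spaces(string: str, length: int = 4) -> str:
--     arr = []
--     for i in range(len(string), 0, -length):
--         start = i - length
--         if start < 0:
--             start = 0
--         temp = string[start: i]
--         arr.append(temp)
--     arr = arr[::-1]
--     return ' '.join(arr)
-- ===== SOURCE B (Python) =====
-- def get_with_spaces(string: str, length: int = 4) -> str:
--     n = len(string)
--     first = n % length
--     parts = [string[:first]] if first else []
--     parts += [string[i:i + length] for i in range(first, n, length)]
--     return ' '.join(parts)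
-- ===== Notes on version B (the rewrite author's own statement) =====
-- stated objective: simpler
-- what changed: B computes the size of the leading partial chunk as len(string) % length and emits the chunks left-to-right in one forward pass, instead of A's right-to-left collection of clamped slices followed by a list reversal; Pre_ excludes length <= 0, where A raises (length = 0, ValueError) or the input is meaningless and both programs' values are accidental (negative length).
-- outside the precondition, e.g. on get_with_spaces('abcdef', -4): A returns '', B returns 'abcd'
import Mathlib
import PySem

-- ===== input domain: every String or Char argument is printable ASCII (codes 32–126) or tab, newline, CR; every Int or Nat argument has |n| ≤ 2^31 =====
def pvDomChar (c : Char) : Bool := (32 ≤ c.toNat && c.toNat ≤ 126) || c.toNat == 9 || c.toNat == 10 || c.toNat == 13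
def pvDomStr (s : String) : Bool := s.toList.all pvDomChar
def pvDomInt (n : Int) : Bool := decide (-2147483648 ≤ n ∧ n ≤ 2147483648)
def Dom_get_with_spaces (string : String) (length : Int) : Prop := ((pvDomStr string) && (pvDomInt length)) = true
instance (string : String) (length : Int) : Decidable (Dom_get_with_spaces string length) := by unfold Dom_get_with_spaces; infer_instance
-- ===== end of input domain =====

-- B chunks the string left-to-right (leading chunk size = len % length) in one forward pass,
-- instead of A's right-to-left clamped slicing followed by a list reversal; objective: simpler.

-- ===== PORT A =====
def get_with_spaces (string : String) (length : Int) : String :=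
  let arr : List String :=
    (PySem.List.pyRange (PySem.Str.len string) 0 (-length)).foldl
      (fun arr i =>
        let start := i - length
        let start := if start < 0 then 0 else start
        let temp := PySem.Str.slice string (some start) (some i)
        arr ++ [temp]) []
  let arr := (PySem.List.slice? arr none none (-1)).getD []   -- arr[::-1]; step -1 is never none
  PySem.Str.join " " arr

-- ===== PORT B =====
def get_with_spaces_alt (string : String) (length : Int) : String :=
  let n := PySem.Str.len string
  let first := PySem.Int.mod n length
  let parts : List String :=
    if first ≠ 0 then [PySem.Str.slice string none (some first)] else []
  let parts := parts ++
    (PySem.List.pyRange first n length).map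
      (fun i => PySem.Str.slice string (some i) (some (i + length)))
  PySem.Str.join " " parts

-- ===== PRECONDITION & SPEC =====
-- Pre_ excludes length ≤ 0: at length = 0 Python A raises ValueError (range() step 0, B raises
-- ZeroDivisionError); for negative length the input is meaningless and both programs return
-- accidental values (A the empty string, B a truncated prefix) that no one would specify.
def Pre_get_with_spaces (string : String) (length : Int) : Prop := 0 < length
instance (string : String) (length : Int) : Decidable (Pre_get_with_spaces string length) := by
  unfold Pre_get_with_spaces; infer_instance
def pvWitness_get_with_spaces : String × Int := ("abcdef", 4)
def Spec_get_with_spaces (string : String) (length : Int) (out : String) : Prop :=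
  out = get_with_spaces_alt string length
instance (string : String) (length : Int) (out : String) : Decidable (Spec_get_with_spaces string length out) := by
  unfold Spec_get_with_spaces; infer_instance

-- ===== CLAIM (what is proved, stated in full; the proofs are below) =====
def Claim_equal_get_with_spaces : Prop := ∀ (string : String) (length : Int), Dom_get_with_spaces string length → Pre_get_with_spaces string length → Spec_get_with_spaces string length (get_with_spaces string length)

-- ===== LEMMAS AND PROOFS =====

-- range(n, 0, -L) for 0 < L, 0 < n starts with n and continues from n - L.
lemma pyRange_negstep_cons (L n : Int) (hL : 0 < L) (hn : 0 < n) :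
    PySem.List.pyRange n 0 (-L) = n :: PySem.List.pyRange (n - L) 0 (-L) := by
  have hLne : -L ≠ 0 := by omega
  have hnotpos : ¬ (0 < -L) := by omega
  simp only [PySem.List.pyRange, if_neg hLne, hnotpos, if_false, if_pos hn, neg_neg]
  have hcount : n - 0 + L - 1 = (n - 1) + L * 1 := by ring
  have h1 : (n - 0 + L - 1) / L = (n - 1) / L + 1 := by
    rw [hcount, Int.add_mul_ediv_left _ _ (by omega : L ≠ 0)]
  have hq0 : 0 ≤ (n - 1) / L := Int.ediv_nonneg (by omega) (by omega)
  by_cases hsmall : 0 < n - L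
  · have : (n - L - 0 + L - 1) / L = (n - 1) / L := by ring_nf
    rw [if_pos hsmall, this, h1]
    have htn : ((n - 1) / L + 1).toNat = ((n - 1) / L).toNat + 1 := by omega
    rw [htn, List.range_succ_eq_map, List.map_cons, List.map_map]
    congr 1
    · push_cast; ring
    · apply List.map_congr_left
      intro k _
      simp only [Function.comp_apply, Nat.succ_eq_add_one]
      push_cast
      ring
  · rw [if_neg hsmall, h1]
    have hz : (n - 1) / L = 0 := Int.ediv_eq_zero_of_lt (by omega) (by omega)
    rw [hz]
    simp

-- range(r, n, L) ends with n - L when L divides n - r and r < n.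
lemma pyRange_append_last (L r n : Int) (hL : 0 < L) (hr : r < n) (hd : L ∣ n - r) :
    PySem.List.pyRange r n L = PySem.List.pyRange r (n - L) L ++ [n - L] := by
  obtain ⟨q, hq⟩ := hd
  have hq1 : 1 ≤ q := by nlinarith
  rw [PySem.List.pyRange_of_pos _ _ hL, PySem.List.pyRange_of_pos _ _ hL]
  have hc1 : n - r + L - 1 = (L - 1) + L * q := by linear_combination hq
  have e1 : (n - r + L - 1) / L = q := by
    rw [hc1, Int.add_mul_ediv_left _ _ (by omega : L ≠ 0),
      Int.ediv_eq_zero_of_lt (by omega) (by omega)]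
    omega
  rw [if_pos hr, e1]
  by_cases h2 : r < n - L
  · have hq2 : 2 ≤ q := by nlinarith
    have hc2 : n - L - r + L - 1 = (L - 1) + L * (q - 1) := by linear_combination hq
    have e2 : (n - L - r + L - 1) / L = q - 1 := by
      rw [hc2, Int.add_mul_ediv_left _ _ (by omega : L ≠ 0),
        Int.ediv_eq_zero_of_lt (by omega) (by omega)]
      omega
    rw [if_pos h2, e2]
    have htn : q.toNat = (q - 1).toNat + 1 := by omega
    rw [htn, List.range_succ, List.map_append, List.map_cons]
    congr 2
    push_cast [show ((q - 1).toNat : Int) = q - 1 by omega]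
    omega
  · have hq2 : q = 1 := by nlinarith
    rw [if_neg h2]
    subst hq2
    simp
    omega

-- the reversed countdown range is the leading remainder followed by the shifted stride range
lemma range_rev (L : Int) (hL : 0 < L) : ∀ (m : Nat) (n : Int), 0 ≤ n → n.toNat = m →
    (PySem.List.pyRange n 0 (-L)).reverse =
    (if PySem.Int.mod n L ≠ 0 then [PySem.Int.mod n L] else [])
      ++ (PySem.List.pyRange (PySem.Int.mod n L) n L).map (· + L) := by
  intro m
  induction m using Nat.strong_induction_on with
  | _ m ih =>
    intro n hn hm
    rw [PySem.Int.mod_eq_emod_of_pos hL]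
    have hr0 : 0 ≤ n % L := Int.emod_nonneg n (by omega)
    have hrL : n % L < L := Int.emod_lt_of_pos n hL
    have hdvd : L ∣ n - n % L := ⟨n / L, by linear_combination (Int.mul_ediv_add_emod n L).symm⟩
    rcases lt_trichotomy n 0 with h | h | h
    · omega
    · subst h
      simp [PySem.List.pyRange]
    · rw [pyRange_negstep_cons L n hL h, List.reverse_cons]
      by_cases hbig : L < n
      · have hmod : (n - L) % L = n % L := Int.sub_emod_right n L
        have hrec := ih (n - L).toNat (by omega) (n - L) (by omega) rfl
        rw [PySem.Int.mod_eq_emod_of_pos hL, hmod] at hrec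
        rw [hrec]
        have hle : n % L < n := by omega
        rw [pyRange_append_last L (n % L) n hL hle hdvd, List.map_append]
        simp [List.append_assoc]
      · -- 0 < n ≤ L : single element
        have hnil : PySem.List.pyRange (n - L) 0 (-L) = [] := by
          simp only [PySem.List.pyRange]
          rw [if_neg (by omega : ¬ (-L) = 0)]
          simp only [if_neg (by omega : ¬ (0:Int) < -L), if_neg (by omega : ¬ (0:Int) < n - L)]
          simp
        rw [hnil]
        by_cases heq : n = L
        · subst heq
          have hmod : n % n = 0 := Int.emod_self
          rw [hmod]
          rw [if_neg (by simp)]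
          have : PySem.List.pyRange 0 n n = [0] := by
            rw [PySem.List.pyRange_of_pos _ _ hL, if_pos (by omega)]
            have : (n - 0 + n - 1) / n = 1 := by
              have : n - 0 + n - 1 = (n - 1) + n * 1 := by ring
              rw [this, Int.add_mul_ediv_left _ _ (by omega : n ≠ 0),
                Int.ediv_eq_zero_of_lt (by omega) (by omega)]
              omega
            rw [this]
            simp
          rw [this]
          simp
        · have hmod : n % L = n := Int.emod_eq_of_lt (by omega) (by omega)
          rw [hmod, if_pos (by omega : n ≠ 0)]
          have : PySem.List.pyRange n n L = [] := by
            rw [PySem.List.pyRange_of_pos _ _ hL, if_neg (by omega)]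
            simp
          rw [this]
          simp

-- A equals B on every input with 0 < length
lemma get_with_spaces_eq_alt (string : String) (length : Int) (hL : 0 < length) :
    get_with_spaces string length = get_with_spaces_alt string length := by
  unfold get_with_spaces get_with_spaces_alt
  simp only [PySem.List.foldl_append_singleton_eq_map, List.nil_append,
    PySem.List.slice?_none_none_neg_one, Option.getD_some]
  rw [← List.map_reverse]
  have hn0 : (0:Int) ≤ PySem.Str.len string := by simp [PySem.Str.len_eq]
  rw [range_rev length hL (PySem.Str.len string).toNat _ hn0 rfl]
  rw [List.map_append, List.map_map]
  set n := PySem.Str.len string with hn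
  set r := PySem.Int.mod n length with hrdef
  have hr0 : 0 ≤ r := by
    rw [hrdef, PySem.Int.mod_eq_emod_of_pos hL]; exact Int.emod_nonneg n (by omega)
  have hrL : r < length := by
    rw [hrdef, PySem.Int.mod_eq_emod_of_pos hL]; exact Int.emod_lt_of_pos n hL
  congr 1
  congr 1
  · -- the leading (possibly partial) chunk: A clamps its start to 0, B slices from the beginning
    by_cases hr : r ≠ 0
    · rw [if_pos hr, if_pos hr, List.map_cons, List.map_nil]
      have : (if r - length < 0 then 0 else r - length) = 0 := by rw [if_pos (by omega)]
      simp only [this]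
      simp [PySem.Str.slice, PySem.Chars.slice_eq_listSlice]
    · rw [if_neg hr, if_neg hr, List.map_nil]
  · -- the full chunks: A's slice ending at j + length is B's slice starting at j
    apply List.map_congr_left
    intro j hj
    have hj0 : r ≤ j := ((PySem.List.mem_pyRange_iff_of_pos hL j).mp hj).1
    simp only [Function.comp_apply]
    rw [if_neg (by omega)]
    congr 2 <;> omega

-- ===== VERDICT (by name: the statement is the Claim_ definition above) =====
theorem get_with_spaces_spec : Claim_equal_get_with_spaces := by
  intro string length _ hPre
  unfold Spec_get_with_spaces
  exact get_with_spaces_eq_alt string length hPre
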